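-- pv_equiv track=rewrite | github.com/dude-guy-boy/pk-bot | extensions/games/battleship.py | compute_checkable_offsets
-- ===== SOURCE A (Python) =====
-- def compute_checkable_offsets(cell_coordinate):
--     offsets = [(-1, -1), (-1, 0), (-1, 1), (0, -1), (0, 1), (1, -1), (1, 0), (1, 1)]
--
--     # Remove impossible offsets
--     if cell_coordinate[0] == 0:
--         # Cant check cells above
--         remove_offsets = [(-1, -1), (-1, 0), (-1, 1)]
--         for offset in remove_offsets:
--             try:
--                 offsets.remove(offset)
--             except:
--                 pass
--
--     if cell_coordinate[0] == 4:
--         # Cant check cells below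
--         remove_offsets = [(1, -1), (1, 0), (1, 1)]
--         for offset in remove_offsets:
--             try:
--                 offsets.remove(offset)
--             except:
--                 pass
--
--     if cell_coordinate[1] == 0:
--         # Cant check cells to the left
--         remove_offsets = [(-1, -1), (0, -1), (1, -1)]
--         for offset in remove_offsets:
--             try:
--                 offsets.remove(offset)
--             except:
--                 pass
--
--     if cell_coordinate[1] == 4:
--         # Cant check cells to the right
--         remove_offsets = [(-1, 1), (0, 1), (1, 1)]
--         for offset in remove_offsets:
--             try:
--                 offsets.remove(offset)
--             except:
--                 pass
--
--     return offsets
-- ===== SOURCE B (Python) =====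
-- def compute_checkable_offsets(cell_coordinate):
--     row, col = cell_coordinate[0], cell_coordinate[1]
--     drs = [d for d in (-1, 0, 1) if not (d == -1 and row == 0) and not (d == 1 and row == 4)]
--     dcs = [d for d in (-1, 0, 1) if not (d == -1 and col == 0) and not (d == 1 and col == 4)]
--     return [(dr, dc) for dr in drs for dc in dcs if (dr, dc) != (0, 0)]
-- ===== Notes on version B (the rewrite author's own statement) =====
-- stated objective: simpler
-- what changed: B builds the result directly as a row-major product of allowed row/column deltas (skipping the zero offset) instead of starting from the full 8-offset list and repeatedly removing entries inside try/except.
import Mathlib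
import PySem

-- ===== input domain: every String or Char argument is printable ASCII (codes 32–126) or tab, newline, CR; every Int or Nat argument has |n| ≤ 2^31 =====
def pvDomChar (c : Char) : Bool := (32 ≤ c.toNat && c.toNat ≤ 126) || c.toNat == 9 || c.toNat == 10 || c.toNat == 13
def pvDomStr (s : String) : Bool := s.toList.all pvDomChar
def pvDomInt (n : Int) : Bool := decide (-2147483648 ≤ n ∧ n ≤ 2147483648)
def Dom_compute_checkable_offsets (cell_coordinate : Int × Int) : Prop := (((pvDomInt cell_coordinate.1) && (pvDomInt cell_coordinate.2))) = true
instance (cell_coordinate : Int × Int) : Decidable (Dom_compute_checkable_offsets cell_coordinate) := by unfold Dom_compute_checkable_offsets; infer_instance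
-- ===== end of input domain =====

-- B replaces A's remove-from-full-list-with-try/except construction by directly building the
-- row-major product of allowed row/column deltas, skipping the zero offset: simpler decomposition, same values.


-- ===== PORT A =====
-- `try: offsets.remove(o) except: pass` — remove first occurrence if present, else keep the list
def pvTryRemove (l : List (Int × Int)) (o : Int × Int) : List (Int × Int) :=
  match PySem.List.remove? l o with
  | some l' => l'
  | none => l

def compute_checkable_offsets (cell_coordinate : Int × Int) : List (Int × Int) :=
  let offsets := [((-1 : Int), (-1 : Int)), (-1, 0), (-1, 1), (0, -1), (0, 1), (1, -1), (1, 0), (1, 1)]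
  let offsets := if cell_coordinate.1 == 0 then
      [((-1 : Int), (-1 : Int)), (-1, 0), (-1, 1)].foldl pvTryRemove offsets
    else offsets
  let offsets := if cell_coordinate.1 == 4 then
      [((1 : Int), (-1 : Int)), (1, 0), (1, 1)].foldl pvTryRemove offsets
    else offsets
  let offsets := if cell_coordinate.2 == 0 then
      [((-1 : Int), (-1 : Int)), (0, -1), (1, -1)].foldl pvTryRemove offsets
    else offsets
  let offsets := if cell_coordinate.2 == 4 then
      [((-1 : Int), (1 : Int)), (0, 1), (1, 1)].foldl pvTryRemove offsets
    else offsets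
  offsets

-- ===== PORT B =====
def compute_checkable_offsets_alt (cell_coordinate : Int × Int) : List (Int × Int) :=
  let row := cell_coordinate.1
  let col := cell_coordinate.2
  let drs := [(-1 : Int), 0, 1].filter (fun d => !(d == -1 && row == 0) && !(d == 1 && row == 4))
  let dcs := [(-1 : Int), 0, 1].filter (fun d => !(d == -1 && col == 0) && !(d == 1 && col == 4))
  drs.flatMap (fun dr => (dcs.filter (fun dc => !((dr, dc) == ((0 : Int), (0 : Int))))).map (fun dc => (dr, dc)))

-- ===== PRECONDITION & SPEC =====
def Spec_compute_checkable_offsets (cell_coordinate : Int × Int) (out : List (Int × Int)) : Prop := out = compute_checkable_offsets_alt cell_coordinate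
instance (cell_coordinate : Int × Int) (out : List (Int × Int)) : Decidable (Spec_compute_checkable_offsets cell_coordinate out) := by unfold Spec_compute_checkable_offsets; infer_instance

-- ===== CLAIM (what is proved, stated in full; the proofs are below) =====
def Claim_equal_compute_checkable_offsets : Prop := ∀ (cell_coordinate : Int × Int), Dom_compute_checkable_offsets cell_coordinate → Spec_compute_checkable_offsets cell_coordinate (compute_checkable_offsets cell_coordinate)

-- ===== LEMMAS AND PROOFS =====

-- ===== VERDICT (by name: the statement is the Claim_ definition above) =====
theorem compute_checkable_offsets_spec : Claim_equal_compute_checkable_offsets := by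
  intro ⟨r, c⟩ _
  unfold Spec_compute_checkable_offsets compute_checkable_offsets compute_checkable_offsets_alt
  by_cases h1 : r = 0 <;> by_cases h2 : r = 4 <;> by_cases h3 : c = 0 <;> by_cases h4 : c = 4 <;>
    simp_all <;> rfl
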